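-- pv_equiv track=rewrite | github.com/viktorparipas92/leetcode | bit_manipulation/371_sum_of_two_integers.py | get_sum_bit_manipulation
-- ===== SOURCE A (Python) =====
-- MASK: int = 0xFFFFFFFF
--
-- MAX_INT: int = 0x7FFFFFFF
--
-- NUMBER_OF_BITS: int = 32
--
-- def get_sum_bit_manipulation(*args: int) -> int:
--     """
--     Time complexity: O(1)
--     Space complexity: O(1)
--     """
--     a, b = args
--     carry: int = 0
--     result: int = 0
--
--     for i in range(NUMBER_OF_BITS):
--         a_bit = (a >> i) & 1
--         b_bit = (b >> i) & 1
--
--         current_bit = a_bit ^ b_bit ^ carry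
--         carry = (a_bit + b_bit + carry) >= 2
--         if current_bit:
--             result |= (1 << i)
--
--     if result > MAX_INT:  # If result is negative
--         result = ~(result ^ MASK)  # Two's complement to get the negative number
--
--     return result
-- ===== SOURCE B (Python) =====
-- def get_sum_bit_manipulation(*args: int) -> int:
--     """Closed form: wrap the ordinary sum into signed 32-bit range."""
--     a, b = args
--     return (a + b + 2**31) % 2**32 - 2**31
-- ===== Notes on version B (the rewrite author's own statement) =====
-- stated objective: simpler
-- what changed: Replaced the 32-iteration bit-by-bit ripple-carry loop (and the explicit two's-complement sign fix-up) with a one-line closed form that wraps a+b into the signed 32-bit range via a single modulo.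
import Mathlib
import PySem

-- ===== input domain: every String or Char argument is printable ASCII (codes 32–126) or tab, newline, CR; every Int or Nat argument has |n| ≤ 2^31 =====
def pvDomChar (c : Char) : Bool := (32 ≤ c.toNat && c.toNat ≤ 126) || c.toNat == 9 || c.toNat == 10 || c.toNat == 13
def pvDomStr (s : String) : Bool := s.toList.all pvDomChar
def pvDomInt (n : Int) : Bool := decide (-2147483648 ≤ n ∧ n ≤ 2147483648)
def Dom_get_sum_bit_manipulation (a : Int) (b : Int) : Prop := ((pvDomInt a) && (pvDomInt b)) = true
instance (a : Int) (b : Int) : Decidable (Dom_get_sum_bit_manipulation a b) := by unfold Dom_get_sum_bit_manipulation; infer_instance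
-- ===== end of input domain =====

-- B replaces A's 32-iteration ripple-carry bit loop (plus explicit two's-complement fix-up)
-- with a one-line closed form wrapping a+b into the signed 32-bit range (objective: simpler).

-- ===== PORT A =====
def pvMASK : Int := 0xFFFFFFFF
def pvMAX_INT : Int := 0x7FFFFFFF
def pvNUMBER_OF_BITS : Int := 32

-- loop body of A; Python's `a >> i` is Int's `>>>` (arithmetic shift), `& 1` / `^` / `|` are
-- PySem.Int.band/bxor/bor (Python-exact on negatives); `carry = (...) >= 2` stores the bool as 0/1
-- exactly as Python's bool does when later added.
def pvStepA (a b : Int) (st : Int × Int) (i : Int) : Int × Int :=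
  let a_bit := PySem.Int.band (a >>> i.toNat) 1
  let b_bit := PySem.Int.band (b >>> i.toNat) 1
  let current_bit := PySem.Int.bxor (PySem.Int.bxor a_bit b_bit) st.1
  let carry : Int := if a_bit + b_bit + st.1 ≥ 2 then 1 else 0
  let result := if current_bit ≠ 0 then PySem.Int.bor st.2 ((1:Int) <<< i.toNat) else st.2
  (carry, result)

def get_sum_bit_manipulation (a : Int) (b : Int) : Int :=
  let st := (PySem.List.pyRange 0 pvNUMBER_OF_BITS).foldl (pvStepA a b) (0, 0)
  let result := st.2
  if result > pvMAX_INT then Int.not (PySem.Int.bxor result pvMASK) else result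

-- ===== PORT B =====
def get_sum_bit_manipulation_alt (a : Int) (b : Int) : Int :=
  PySem.Int.mod (a + b + 2^31) (2^32) - 2^31

-- ===== PRECONDITION & SPEC =====
def Spec_get_sum_bit_manipulation (a : Int) (b : Int) (out : Int) : Prop := out = get_sum_bit_manipulation_alt a b
instance (a : Int) (b : Int) (out : Int) : Decidable (Spec_get_sum_bit_manipulation a b out) := by unfold Spec_get_sum_bit_manipulation; infer_instance

-- ===== CLAIM (what is proved, stated in full; the proofs are below) =====
def Claim_equal_get_sum_bit_manipulation : Prop := ∀ (a : Int) (b : Int), Dom_get_sum_bit_manipulation a b → Spec_get_sum_bit_manipulation a b (get_sum_bit_manipulation a b)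

-- ===== LEMMAS AND PROOFS =====

-- x ||| 2^i adds the (absent) bit i
theorem pv_nat_lor_pow (i : Nat) : ∀ r : Nat, r < 2^i → r ||| 2^i = r + 2^i := by
  induction i with
  | zero => intro r h; interval_cases r; decide
  | succ i ih =>
    intro r h
    have hr : r = Nat.bit (decide (r % 2 = 1)) (r / 2) := by
      simp [Nat.bit_val]; rcases Nat.mod_two_eq_zero_or_one r with h2 | h2 <;> simp [h2] <;> omega
    have hp : (2:Nat)^(i+1) = Nat.bit false (2^i) := by simp [Nat.bit_val]; ring
    rw [hr, hp, Nat.lor_bit]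
    have hq : r / 2 < 2^i := by
      have : r < 2^i * 2 := by rw [pow_succ] at h; omega
      omega
    rw [ih _ hq]
    simp [Nat.bit_val]
    rcases Nat.mod_two_eq_zero_or_one r with h2 | h2 <;> simp [h2] <;> omega

-- xor with the all-ones mask is complement within the width
theorem pv_nat_xor_mask (i : Nat) : ∀ r : Nat, r < 2^i → r ^^^ (2^i - 1) = 2^i - 1 - r := by
  induction i with
  | zero => intro r h; interval_cases r; decide
  | succ i ih =>
    intro r h
    have hr : r = Nat.bit (decide (r % 2 = 1)) (r / 2) := by
      simp [Nat.bit_val]; rcases Nat.mod_two_eq_zero_or_one r with h2 | h2 <;> simp [h2] <;> omega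
    have h1 : (0:Nat) < 2^i := Nat.two_pow_pos _
    have hp : (2:Nat)^(i+1) - 1 = Nat.bit true (2^i - 1) := by simp [Nat.bit_val]; rw [pow_succ]; omega
    rw [hr, hp, Nat.xor_bit]
    have hq : r / 2 < 2^i := by
      have : r < 2^i * 2 := by rw [pow_succ] at h; omega
      omega
    rw [ih _ hq]
    simp [Nat.bit_val]
    rcases Nat.mod_two_eq_zero_or_one r with h2 | h2 <;> simp [h2] <;> omega

-- splitting an emod by 2^(k+1) into bit k and the low part
theorem pv_split (s r : Int) (k : Nat) (h0 : 0 ≤ r) (h1 : r < 2^k) :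
    (s * 2^k + r) % 2^(k+1) = (s % 2) * 2^k + r := by
  have hP : (0:Int) < 2^k := by positivity
  have hs : s = 2 * (s / 2) + s % 2 := by omega
  have key : s * 2^k + r = ((s % 2) * 2^k + r) + 2^(k+1) * (s / 2) := by
    rw [pow_succ]; nlinarith [hs]
  rw [key, Int.add_mul_emod_self_left]
  have h2 : 0 ≤ s % 2 ∧ s % 2 < 2 := ⟨Int.emod_nonneg s (by norm_num), Int.emod_lt_of_pos s (by norm_num)⟩
  apply Int.emod_eq_of_lt
  · nlinarith [h2.1]
  · rw [pow_succ]; nlinarith [h2.2]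

theorem pv_emod_succ (a : Int) (k : Nat) :
    a % 2^(k+1) = ((a / 2^k) % 2) * 2^k + a % 2^k := by
  have hP : (0:Int) < 2^k := by positivity
  have h0 : 0 ≤ a % 2^k := Int.emod_nonneg a (by positivity)
  have h1 : a % 2^k < 2^k := Int.emod_lt_of_pos a hP
  have := pv_split (a / 2^k) (a % 2^k) k h0 h1
  rwa [Int.ediv_mul_add_emod a (2^k)] at this

-- Int.not is arithmetic complement
theorem pv_int_not (z : Int) : Int.not z = -z - 1 := by
  rcases z with n | n
  · simp [Int.not]; omega
  · simp [Int.not]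

-- r ||| 2^k adds bit k when r < 2^k
theorem pv_bor_pow (r : Int) (k : Nat) (h0 : 0 ≤ r) (h1 : r < 2^k) :
    PySem.Int.bor r (2^k) = r + 2^k := by
  have hk : ((2:Int)^k) = ((2^k : Nat) : Int) := by push_cast; ring
  rw [PySem.Int.bor_of_nonneg h0 (by positivity), hk, Int.toNat_natCast]
  have hrk : r.toNat < 2^k := by omega
  rw [pv_nat_lor_pow k r.toNat hrk]
  push_cast
  omega

-- one loop step, with every quantity abstracted to a variable (P = 2^n)
theorem pv_step_final (P x y An Bn rn A1 B1 S1 bo : Int)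
    (_hP : 0 < P)
    (hx : x = 0 ∨ x = 1) (hy : y = 0 ∨ y = 1)
    (hA0 : 0 ≤ An) (_hA1 : An < P) (hB0 : 0 ≤ Bn) (_hB1 : Bn < P)
    (hr0 : 0 ≤ rn) (hr1 : rn < P)
    (hsum : An + Bn = (if An + Bn ≥ P then (1:Int) else 0) * P + rn)
    (hAs : A1 = x * P + An) (hBs : B1 = y * P + Bn)
    (hS1 : S1 = ((x + y + (if An + Bn ≥ P then (1:Int) else 0)) % 2) * P + rn)
    (hbor : bo = rn + P) :
    ((if x + y + (if An + Bn ≥ P then (1:Int) else 0) ≥ 2 then (1:Int) else 0),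
     (if PySem.Int.bxor (PySem.Int.bxor x y) (if An + Bn ≥ P then (1:Int) else 0) ≠ 0 then bo else rn))
    = ((if A1 + B1 ≥ 2 * P then (1:Int) else 0), S1) := by
  by_cases hc : An + Bn ≥ P <;>
    simp only [hc, if_true, if_false] at hsum hS1 ⊢ <;>
    rcases hx with hx | hx <;> rcases hy with hy | hy <;> subst hx hy <;>
    norm_num [PySem.Int.bxor] at hS1 ⊢ <;>
    subst hAs hBs hS1 hbor <;>
    constructor <;>
    omega

-- the loop invariant: after n iterations, result is (a+b) mod 2^n and
-- carry flags whether the low-n-bit sum overflowed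
theorem pv_loop_char (a b : Int) : ∀ n : Nat,
    (PySem.List.pyRange 0 (n:Int)).foldl (pvStepA a b) (0, 0)
      = (if a % 2^n + b % 2^n ≥ 2^n then (1:Int) else 0, (a + b) % 2^n) := by
  intro n
  induction n with
  | zero =>
    norm_num [PySem.List.pyRange, Int.emod_one]
  | succ n ih =>
    have hc : ((n:Int) + 1) = ((n+1 : Nat) : Int) := by push_cast; ring
    rw [← hc, PySem.List.pyRange_one_succ_right (by positivity), List.foldl_append, ih]
    have hP : (0:Int) < 2^n := by positivity
    have hA0 : 0 ≤ a % 2^n := Int.emod_nonneg a (by positivity)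
    have hA1 : a % 2^n < 2^n := Int.emod_lt_of_pos a hP
    have hB0 : 0 ≤ b % 2^n := Int.emod_nonneg b (by positivity)
    have hB1 : b % 2^n < 2^n := Int.emod_lt_of_pos b hP
    have hr0 : 0 ≤ (a + b) % 2^n := Int.emod_nonneg (a+b) (by positivity)
    have hr1 : (a + b) % 2^n < 2^n := Int.emod_lt_of_pos (a+b) hP
    have habit : PySem.Int.band ((a:Int) >>> (n:Int).toNat) 1 = (a / 2^n) % 2 := by
      rw [Int.toNat_natCast, PySem.Int.band_one, PySem.Int.mod_eq_emod_of_pos (by norm_num),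
        Int.shiftRight_eq_div_pow]
      norm_num
    have hbbit : PySem.Int.band ((b:Int) >>> (n:Int).toNat) 1 = (b / 2^n) % 2 := by
      rw [Int.toNat_natCast, PySem.Int.band_one, PySem.Int.mod_eq_emod_of_pos (by norm_num),
        Int.shiftRight_eq_div_pow]
      norm_num
    have hshl : (1:Int) <<< (n:Int).toNat = 2^n := by
      rw [Int.toNat_natCast, Int.shiftLeft_eq]; ring
    have hmod : (a % 2^n + b % 2^n) % 2^n = (a + b) % 2^n := (Int.add_emod a b (2^n)).symm
    have hsum : a % 2^n + b % 2^n
        = (if a % 2^n + b % 2^n ≥ 2^n then (1:Int) else 0) * 2^n + (a + b) % 2^n := by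
      split
      · rename_i hge
        have h' : (a % 2^n + b % 2^n) - 2^n = (a % 2^n + b % 2^n) % 2^n := by
          rw [← Int.sub_emod_right (a % 2^n + b % 2^n) (2^n)]
          exact (Int.emod_eq_of_lt (by omega) (by omega)).symm
        omega
      · rename_i hlt
        have h' : a % 2^n + b % 2^n = (a % 2^n + b % 2^n) % 2^n :=
          (Int.emod_eq_of_lt (by omega) (by omega)).symm
        omega
    have hpow : (2:Int)^(n+1) = 2 * 2^n := by ring
    have hAs : a % (2 * 2^n) = ((a / 2^n) % 2) * 2^n + a % 2^n := by
      rw [← hpow]; exact pv_emod_succ a n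
    have hBs : b % (2 * 2^n) = ((b / 2^n) % 2) * 2^n + b % 2^n := by
      rw [← hpow]; exact pv_emod_succ b n
    have habs : (a + b) % (2 * 2^n)
        = ((((a / 2^n) % 2) + ((b / 2^n) % 2)
            + (if a % 2^n + b % 2^n ≥ 2^n then (1:Int) else 0)) % 2) * 2^n + (a + b) % 2^n := by
      rw [← hpow]
      have h1 : (a + b) % 2^(n+1) = ((a % 2^(n+1)) + (b % 2^(n+1))) % 2^(n+1) :=
        Int.add_emod a b (2^(n+1))
      rw [h1]
      rw [show a % 2^(n+1) = ((a / 2^n) % 2) * 2^n + a % 2^n from pv_emod_succ a n]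
      rw [show b % 2^(n+1) = ((b / 2^n) % 2) * 2^n + b % 2^n from pv_emod_succ b n]
      have h2 : ((a / 2^n) % 2) * 2^n + a % 2^n + (((b / 2^n) % 2) * 2^n + b % 2^n)
          = (((a / 2^n) % 2) + ((b / 2^n) % 2)
             + (if a % 2^n + b % 2^n ≥ 2^n then (1:Int) else 0)) * 2^n + (a + b) % 2^n := by
        linear_combination hsum
      rw [h2, pv_split _ _ _ hr0 hr1]
    simp only [List.foldl_cons, List.foldl_nil, pvStepA, habit, hbbit, hshl]
    rw [hpow]
    exact pv_step_final (2^n) _ _ _ _ _ _ _ _ _ hP (Int.emod_two_eq _) (Int.emod_two_eq _)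
      hA0 hA1 hB0 hB1 hr0 hr1 hsum hAs hBs habs (pv_bor_pow _ n hr0 hr1)

-- final sign fix-up: for 0 ≤ r < 2^32, ~(r ^ MASK) = r - 2^32
theorem pv_signfix (r : Int) (h0 : 0 ≤ r) (h1 : r < 2^32) :
    Int.not (PySem.Int.bxor r pvMASK) = r - 2^32 := by
  have hmask : pvMASK = ((2^32 - 1 : Nat) : Int) := by decide
  rw [hmask, PySem.Int.bxor_of_nonneg h0 (by positivity),
    Int.toNat_natCast, pv_nat_xor_mask 32 r.toNat (by omega)]
  have h2 : ((2^32 - 1 - r.toNat : Nat) : Int) = 2^32 - 1 - r := by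
    push_cast
    omega
  rw [h2, pv_int_not]
  ring

-- ===== VERDICT (by name: the statement is the Claim_ definition above) =====
theorem get_sum_bit_manipulation_spec : Claim_equal_get_sum_bit_manipulation := by
  intro a b _hdom
  unfold Spec_get_sum_bit_manipulation get_sum_bit_manipulation get_sum_bit_manipulation_alt
  have h32 : pvNUMBER_OF_BITS = ((32:Nat) : Int) := by decide
  rw [h32, pv_loop_char a b 32]
  have hP : (0:Int) < 2^32 := by positivity
  set m := (a + b) % 2^32 with hm
  have hm0 : 0 ≤ m := Int.emod_nonneg (a+b) (by positivity)
  have hm1 : m < 2^32 := Int.emod_lt_of_pos (a+b) hP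
  have hB : PySem.Int.mod (a + b + 2^31) (2^32) = (m + 2^31) % 2^32 := by
    rw [PySem.Int.mod_eq_emod_of_pos hP, hm]
    conv_lhs => rw [Int.add_emod (a+b) (2^31) (2^32)]
    norm_num
  rw [hB]
  by_cases hbig : m > pvMAX_INT
  · simp only [hbig, if_true]
    rw [pv_signfix m hm0 hm1]
    have : (m + 2^31) % 2^32 = m + 2^31 - 2^32 := by
      have : (m + 2^31) - 2^32 = ((m + 2^31) - 2^32) % 2^32 := by
        refine (Int.emod_eq_of_lt ?_ ?_).symm
        · have : pvMAX_INT = 2^31 - 1 := by decide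
          omega
        · omega
      rw [this, Int.sub_emod_right]
    omega
  · simp only [hbig, if_false]
    have hmax : pvMAX_INT = 2^31 - 1 := by decide
    have : (m + 2^31) % 2^32 = m + 2^31 :=
      Int.emod_eq_of_lt (by omega) (by omega)
    omega
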